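-- pv_equiv track=rewrite | github.com/anon-kart/InvSol | src/LoopSynth/dynamate-sol/ginpink-sol/ginpink.py | _group_expressions
-- ===== SOURCE A (Python) =====
-- def _group_expressions(expr_list):
--     """
--     Groups expressions based on the number of arguments (placeholders '#').
--
--     :param expr_list: List of expressions (strings)
--     :return: Dictionary grouping expressions by argument count
--     """
--     grouped = {}
--     for expr in expr_list:
--         arg_count = expr.count('#')
--         if arg_count not in grouped:
--             grouped[arg_count] = []
--         grouped[arg_count].append(expr)
--     return grouped
-- ===== SOURCE B (Python) =====
-- def _group_expressions(expr_list):
--     """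
--     Groups expressions based on the number of arguments (placeholders '#').
--
--     :param expr_list: List of expressions (strings)
--     :return: Dictionary grouping expressions by argument count
--     """
--     counts = [e.count('#') for e in expr_list]
--     return {k: [e for e, c in zip(expr_list, counts) if c == k]
--             for k in dict.fromkeys(counts)}
-- ===== Notes on version B (the rewrite author's own statement) =====
-- stated objective: simpler
-- what changed: Replaces A's single-pass mutable-dict accumulation (insert-empty-then-append per element) with a two-comprehension decomposition: compute the counts once, take the distinct counts in first-appearance order via dict.fromkeys, and build each group with one filter per key.
import Mathlib
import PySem

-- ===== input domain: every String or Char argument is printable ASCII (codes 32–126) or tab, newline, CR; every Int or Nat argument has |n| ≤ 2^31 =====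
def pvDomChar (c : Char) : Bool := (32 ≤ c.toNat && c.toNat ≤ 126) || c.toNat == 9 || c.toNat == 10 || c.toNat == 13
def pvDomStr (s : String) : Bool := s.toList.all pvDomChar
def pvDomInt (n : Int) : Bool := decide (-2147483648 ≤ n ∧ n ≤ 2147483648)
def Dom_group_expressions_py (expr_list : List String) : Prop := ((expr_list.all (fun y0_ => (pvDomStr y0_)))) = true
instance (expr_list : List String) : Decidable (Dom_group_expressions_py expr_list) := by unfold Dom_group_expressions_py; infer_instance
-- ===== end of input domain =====

-- B groups by distinct '#'-counts in first-appearance order with a filter per key (simpler two-comprehension decomposition) instead of A's single-pass dict accumulation.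

-- ===== PORT A =====
-- literal port of A: one pass, inserting an empty list for a fresh key, then appending
def group_expressions_py (expr_list : List String) : List (Int × List String) :=
  (expr_list.foldl (fun (grouped : PySem.Dict Int (List String)) expr =>
      let argCount : Int := PySem.Str.count expr "#"
      let grouped := if grouped.contains argCount then grouped else grouped.insert argCount []
      grouped.modify argCount [] (fun l => l ++ [expr]))
    PySem.Dict.empty).items

-- ===== PORT B =====
-- literal port of B: counts list, dedup of counts (dict.fromkeys), one filter per key
def group_expressions_py_alt (expr_list : List String) : List (Int × List String) :=
  let counts := expr_list.map (fun e => (PySem.Str.count e "#" : Int))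
  (PySem.List.dedup counts).map (fun k =>
    (k, ((expr_list.zip counts).filter (fun p => p.2 == k)).map (fun p => p.1)))

-- ===== PRECONDITION & SPEC =====
def Spec_group_expressions_py (expr_list : List String) (out : List (Int × List String)) : Prop := out = group_expressions_py_alt expr_list
instance (expr_list : List String) (out : List (Int × List String)) : Decidable (Spec_group_expressions_py expr_list out) := by unfold Spec_group_expressions_py; infer_instance

-- ===== CLAIM (what is proved, stated in full; the proofs are below) =====
def Claim_equal_group_expressions_py : Prop := ∀ (expr_list : List String), Dom_group_expressions_py expr_list → Spec_group_expressions_py expr_list (group_expressions_py expr_list)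

-- ===== LEMMAS AND PROOFS =====

-- A's step (insert-if-missing, then append) acts on the dict exactly like a single modify-append
theorem pv_step_eq (d : PySem.Dict Int (List String)) (k : Int) (e : String) :
    (if d.contains k then d else d.insert k []).modify k [] (fun l => l ++ [e])
      = d.modify k [] (fun l => l ++ [e]) := by
  by_cases h : d.contains k = true
  · simp [h]
  · have h' : d.contains k = false := by simpa using h
    have hg : d.getD k ([] : List String) = [] := PySem.Dict.getD_of_not_contains d [] h'
    simp [h', PySem.Dict.modify, PySem.Dict.getD_insert_self, PySem.Dict.insert_insert_self, hg]

-- within-group contents: A's filtered pair list and B's filtered zip give the same strings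
theorem pv_groups_eq (c : String → Int) (xs : List String) (k : Int) :
    ((xs.map (fun e => (c e, e))).filter (fun p => p.1 == k)).map (fun p => p.2)
      = ((xs.zip (xs.map c)).filter (fun p => p.2 == k)).map (fun p => p.1) := by
  induction xs with
  | nil => simp
  | cons x xs ih => by_cases h : c x = k <;> simp [h, ih]

theorem group_expressions_py_eq_alt (expr_list : List String) :
    group_expressions_py expr_list = group_expressions_py_alt expr_list := by
  unfold group_expressions_py group_expressions_py_alt
  -- replace A's step by the single modify-append, over the key/value pair list
  have hstep :
      expr_list.foldl (fun (grouped : PySem.Dict Int (List String)) expr =>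
          let argCount : Int := PySem.Str.count expr "#"
          let grouped := if grouped.contains argCount then grouped else grouped.insert argCount []
          grouped.modify argCount [] (fun l => l ++ [expr])) PySem.Dict.empty
        = (expr_list.map (fun e => ((PySem.Str.count e "#" : Int), e))).foldl
            (fun (d : PySem.Dict Int (List String)) p => d.modify p.1 [] (fun l => l ++ [p.2]))
            PySem.Dict.empty := by
    rw [List.foldl_map]
    exact PySem.List.foldl_congr_mem _ _ _ _ (fun acc x _ => pv_step_eq acc _ x)
  rw [hstep]
  set l := expr_list.map (fun e => ((PySem.Str.count e "#" : Int), e)) with hl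
  set D := l.foldl (fun (d : PySem.Dict Int (List String)) p =>
      d.modify p.1 [] (fun lst => lst ++ [p.2])) PySem.Dict.empty with hD
  have hkeys : D.keys = PySem.List.dedup (expr_list.map (fun e => (PySem.Str.count e "#" : Int))) := by
    rw [hD, PySem.Dict.keys_foldl_modify_key l (fun p => p.1)]
    simp [hl, PySem.Set.update, PySem.Set.ofList_eq_foldl, List.map_map, Function.comp_def]
  have hnd : D.keys.Nodup := by rw [hkeys]; exact PySem.List.nodup_dedup _
  rw [PySem.Dict.items_eq_map_keys D hnd [], hkeys]
  apply List.map_congr_left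
  intro k _
  have hget : D.getD k [] = (l.filter (fun p => p.1 == k)).map (fun p => p.2) := by
    rw [hD, PySem.Dict.getD_foldl_modify_append]
    simp
  rw [hget, hl, pv_groups_eq]

-- ===== VERDICT (by name: the statement is the Claim_ definition above) =====
theorem group_expressions_py_spec : Claim_equal_group_expressions_py := by
  intro expr_list _
  unfold Spec_group_expressions_py
  exact group_expressions_py_eq_alt expr_list
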